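-- pv_equiv track=rewrite | github.com/LiuYihey/AutoFigure-PPTX | autofigure2.py | _polygon_to_bbox
-- ===== SOURCE A (Python) =====
-- from typing import Optional, List, Dict, Any, Literal
--
-- def _polygon_to_bbox(points: list, width: int, height: int) -> Optional[tuple[int, int, int, int]]:
--     xs: list[float] = []
--     ys: list[float] = []
--
--     for pt in points:
--         if not isinstance(pt, (list, tuple)) or len(pt) < 2:
--             continue
--         try:
--             x = float(pt[0])
--             y = float(pt[1])
--         except (TypeError, ValueError):
--             continue
--         xs.append(x)
--         ys.append(y)
--
--     if not xs or not ys: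
--         return None
--
--     x1 = int(round(min(xs)))
--     y1 = int(round(min(ys)))
--     x2 = int(round(max(xs)))
--     y2 = int(round(max(ys)))
--
--     x1 = max(0, min(width, x1))
--     y1 = max(0, min(height, y1))
--     x2 = max(0, min(width, x2))
--     y2 = max(0, min(height, y2))
--
--     if x2 <= x1 or y2 <= y1:
--         return None
--     return x1, y1, x2, y2
-- ===== SOURCE B (Python) =====
-- def _polygon_to_bbox(points: list, width: int, height: int):
--     # single pass: running min/max, no coordinate lists
--     box = None  # (minx, miny, maxx, maxy)
--     for pt in points:
--         if not isinstance(pt, (list, tuple)) or len(pt) < 2: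
--             continue
--         try:
--             x = float(pt[0])
--             y = float(pt[1])
--         except (TypeError, ValueError):
--             continue
--         if box is None:
--             box = (x, y, x, y)
--         else:
--             mnx, mny, mxx, mxy = box
--             box = (min(mnx, x), min(mny, y), max(mxx, x), max(mxy, y))
--     if box is None:
--         return None
--     mnx, mny, mxx, mxy = box
--     x1 = max(0, min(width, int(round(mnx))))
--     y1 = max(0, min(height, int(round(mny))))
--     x2 = max(0, min(width, int(round(mxx))))
--     y2 = max(0, min(height, int(round(mxy))))
--     if x2 <= x1 or y2 <= y1:
--         return None
--     return x1, y1, x2, y2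
-- ===== Notes on version B (the rewrite author's own statement) =====
-- stated objective: simpler
-- what changed: Replaces the two accumulated coordinate lists plus four separate min/max scans with a single pass that maintains four running extremes in an optional state.
import Mathlib
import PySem

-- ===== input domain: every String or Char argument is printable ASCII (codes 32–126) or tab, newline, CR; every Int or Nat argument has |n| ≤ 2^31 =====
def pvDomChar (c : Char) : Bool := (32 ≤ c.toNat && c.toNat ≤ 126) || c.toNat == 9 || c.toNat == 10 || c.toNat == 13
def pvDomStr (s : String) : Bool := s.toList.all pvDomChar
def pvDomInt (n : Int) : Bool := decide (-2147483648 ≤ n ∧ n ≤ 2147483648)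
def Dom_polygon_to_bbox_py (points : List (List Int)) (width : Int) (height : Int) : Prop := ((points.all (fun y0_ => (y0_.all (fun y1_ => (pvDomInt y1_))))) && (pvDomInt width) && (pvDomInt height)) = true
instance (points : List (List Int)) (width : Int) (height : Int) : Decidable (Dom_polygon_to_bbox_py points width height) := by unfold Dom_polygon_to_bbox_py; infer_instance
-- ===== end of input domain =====

-- B collapses A's two coordinate lists + four min/max scans into one pass with four
-- running extremes (objective: simpler); return values proved identical on all inputs.

-- ===== PORT A =====
-- A's loop: skip points with fewer than 2 coords, append x to xs and y to ys.
-- (coords are ints here, so float() is exact and round() is the identity)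
def pvStepA (acc : List Int × List Int) (pt : List Int) : List Int × List Int :=
  match pt with
  | x :: y :: _ => (acc.1 ++ [x], acc.2 ++ [y])
  | _ => acc

def polygon_to_bbox_py (points : List (List Int)) (width : Int) (height : Int) : Option (Int × Int × Int × Int) :=
  let p := points.foldl pvStepA ([], [])
  match p.1, p.2 with
  | x0 :: xs, y0 :: ys =>
    let x1 := max 0 (min width (xs.foldl min x0))
    let y1 := max 0 (min height (ys.foldl min y0))
    let x2 := max 0 (min width (xs.foldl max x0))
    let y2 := max 0 (min height (ys.foldl max y0))
    if x2 ≤ x1 ∨ y2 ≤ y1 then none else some (x1, y1, x2, y2)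
  | _, _ => none

-- ===== PORT B =====
-- B's loop: optional running (minx, miny, maxx, maxy), initialised at the first valid point.
def pvStepB (st : Option (Int × Int × Int × Int)) (pt : List Int) : Option (Int × Int × Int × Int) :=
  match pt with
  | x :: y :: _ =>
    match st with
    | none => some (x, y, x, y)
    | some (mnx, mny, mxx, mxy) => some (min mnx x, min mny y, max mxx x, max mxy y)
  | _ => st

def polygon_to_bbox_py_alt (points : List (List Int)) (width : Int) (height : Int) : Option (Int × Int × Int × Int) :=
  match points.foldl pvStepB none with
  | none => none
  | some (mnx, mny, mxx, mxy) =>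
    let x1 := max 0 (min width mnx)
    let y1 := max 0 (min height mny)
    let x2 := max 0 (min width mxx)
    let y2 := max 0 (min height mxy)
    if x2 ≤ x1 ∨ y2 ≤ y1 then none else some (x1, y1, x2, y2)

-- ===== PRECONDITION & SPEC =====
def Spec_polygon_to_bbox_py (points : List (List Int)) (width : Int) (height : Int) (out : Option (Int × Int × Int × Int)) : Prop := out = polygon_to_bbox_py_alt points width height
instance (points : List (List Int)) (width : Int) (height : Int) (out : Option (Int × Int × Int × Int)) : Decidable (Spec_polygon_to_bbox_py points width height out) := by unfold Spec_polygon_to_bbox_py; infer_instance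

-- ===== CLAIM (what is proved, stated in full; the proofs are below) =====
def Claim_equal_polygon_to_bbox_py : Prop := ∀ (points : List (List Int)) (width : Int) (height : Int), Dom_polygon_to_bbox_py points width height → Spec_polygon_to_bbox_py points width height (polygon_to_bbox_py points width height)

-- ===== LEMMAS AND PROOFS =====

-- the valid points of the input, as (x, y) pairs
def pvPairs (points : List (List Int)) : List (Int × Int) :=
  points.filterMap (fun pt => match pt with | x :: y :: _ => some (x, y) | _ => none)

-- the pure combining step of B's running state
def pvQuad (q : Int × Int × Int × Int) (p : Int × Int) : Int × Int × Int × Int :=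
  (min q.1 p.1, min q.2.1 p.2, max q.2.2.1 p.1, max q.2.2.2 p.2)

lemma foldA_eq (points : List (List Int)) (acc : List Int × List Int) :
    points.foldl pvStepA acc =
      (acc.1 ++ (pvPairs points).map Prod.fst, acc.2 ++ (pvPairs points).map Prod.snd) := by
  induction points generalizing acc with
  | nil => simp [pvPairs]
  | cons pt rest ih =>
    match pt with
    | [] => simpa [pvPairs, pvStepA] using ih acc
    | [x] => simpa [pvPairs, pvStepA] using ih acc
    | x :: y :: t => simp [pvPairs, pvStepA, ih]

lemma foldB_some (points : List (List Int)) (q : Int × Int × Int × Int) :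
    points.foldl pvStepB (some q) = some ((pvPairs points).foldl pvQuad q) := by
  induction points generalizing q with
  | nil => simp [pvPairs]
  | cons pt rest ih =>
    match pt with
    | [] => simpa [pvPairs, pvStepB] using ih q
    | [x] => simpa [pvPairs, pvStepB] using ih q
    | x :: y :: t =>
      obtain ⟨a, b, c, d⟩ := q
      simp [pvPairs, pvStepB, pvQuad, ih]

lemma foldB_none (points : List (List Int)) :
    points.foldl pvStepB none =
      match pvPairs points with
      | [] => none
      | (x, y) :: r => some (r.foldl pvQuad (x, y, x, y)) := by
  induction points with
  | nil => simp [pvPairs]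
  | cons pt rest ih =>
    match pt with
    | [] => simpa [pvPairs, pvStepB] using ih
    | [x] => simpa [pvPairs, pvStepB] using ih
    | x :: y :: t => simp [pvPairs, pvStepB, foldB_some]

lemma quadfold_eq (r : List (Int × Int)) (a b c d : Int) :
    r.foldl pvQuad (a, b, c, d) =
      ((r.map Prod.fst).foldl min a, (r.map Prod.snd).foldl min b,
       (r.map Prod.fst).foldl max c, (r.map Prod.snd).foldl max d) := by
  induction r generalizing a b c d with
  | nil => simp
  | cons p r ih => simp [pvQuad, ih]

-- ===== VERDICT (by name: the statement is the Claim_ definition above) =====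
theorem polygon_to_bbox_py_spec : Claim_equal_polygon_to_bbox_py := by
  intro points width height _
  unfold Spec_polygon_to_bbox_py polygon_to_bbox_py polygon_to_bbox_py_alt
  rw [foldA_eq, foldB_none]
  cases h : pvPairs points with
  | nil => simp
  | cons p r =>
    obtain ⟨x, y⟩ := p
    simp [quadfold_eq]
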